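-- pv_equiv track=rewrite | github.com/ayushmishra90/Demo-Repo | DSA college questions/ASSG2_122CS0072_AYUSH/ASSG2_122CS0072_AYUSH_3.py | goldbach_combinations
-- ===== SOURCE A (Python) =====
-- def is_prime(num):
--     if num <= 1:
--         return False
--     if num <= 3:
--         return True
--     if num % 2 == 0 or num % 3 == 0:
--         return False
--     i = 5
--     while i * i <= num:
--         if num % i == 0 or num % (i + 2) == 0:
--             return False
--         i += 6
--     return True
--
-- def goldbach_combinations(even_num):
--     prime_numbers = [num for num in range(2, even_num) if is_prime(num)]
--     combinations = 0
--
--     for prime1 in prime_numbers: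
--         prime2 = even_num - prime1
--         if prime2 in prime_numbers and prime2 >= prime1:
--             combinations += 1
--
--     return combinations
-- ===== SOURCE B (Python) =====
-- def _is_prime(num):
--     if num < 2:
--         return False
--     d = 2
--     while d * d <= num:
--         if num % d == 0:
--             return False
--         d += 1
--     return True
--
-- def goldbach_combinations(even_num):
--     count = 0
--     for p in range(2, even_num // 2 + 1):
--         if _is_prime(p) and _is_prime(even_num - p):
--             count += 1
--     return count
-- ===== Notes on version B (the rewrite author's own statement) =====
-- stated objective: faster
-- what changed: B drops A's materialized prime list and its linear inner membership scan: one loop over candidates up to half of even_num tests each candidate and its complement directly with a plain trial-division primality check (no wheel), counting each pair once.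
import Mathlib
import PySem

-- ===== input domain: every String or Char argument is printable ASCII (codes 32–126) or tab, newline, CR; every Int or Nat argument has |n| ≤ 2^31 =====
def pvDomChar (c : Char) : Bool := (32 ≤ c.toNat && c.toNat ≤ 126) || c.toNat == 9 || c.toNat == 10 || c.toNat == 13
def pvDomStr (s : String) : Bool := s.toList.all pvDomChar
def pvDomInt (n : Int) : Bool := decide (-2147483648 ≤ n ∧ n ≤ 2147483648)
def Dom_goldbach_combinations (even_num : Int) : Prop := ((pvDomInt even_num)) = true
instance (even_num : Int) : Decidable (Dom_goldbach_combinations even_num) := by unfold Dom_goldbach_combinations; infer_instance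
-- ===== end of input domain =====

-- B replaces A's prime list + linear membership scan by one direct loop up to even_num//2
-- with a plain trial-division primality test (faster; same values).

-- ===== PORT A =====
-- termination helper for the trial-division loops (cited by decreasing_by)
theorem pv_le_mul_self (i : Int) : i ≤ i * i := by
  by_cases h : i ≤ 0
  · nlinarith
  · nlinarith

def isPrimeLoop (num i : Int) : Bool :=
  if h : i * i ≤ num then
    if PySem.Int.mod num i == 0 || PySem.Int.mod num (i + 2) == 0 then false
    else isPrimeLoop num (i + 6)
  else true
termination_by (num + 1 - i).toNat
decreasing_by
  have := pv_le_mul_self i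
  omega

def isPrime (num : Int) : Bool :=
  if num ≤ 1 then false
  else if num ≤ 3 then true
  else if PySem.Int.mod num 2 == 0 || PySem.Int.mod num 3 == 0 then false
  else isPrimeLoop num 5

def goldbach_combinations (even_num : Int) : Int :=
  let prime_numbers := (PySem.List.pyRange 2 even_num 1).filter isPrime
  prime_numbers.foldl
    (fun combinations prime1 =>
      let prime2 := even_num - prime1
      if prime_numbers.contains prime2 ∧ prime2 ≥ prime1 then combinations + 1
      else combinations) 0

-- ===== PORT B =====
def simpleLoop (num d : Int) : Bool :=
  if h : d * d ≤ num then
    if PySem.Int.mod num d == 0 then false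
    else simpleLoop num (d + 1)
  else true
termination_by (num + 1 - d).toNat
decreasing_by
  have := pv_le_mul_self d
  omega

def simplePrime (num : Int) : Bool :=
  if num < 2 then false else simpleLoop num 2

def goldbach_combinations_alt (even_num : Int) : Int :=
  (PySem.List.pyRange 2 (PySem.Int.floordiv even_num 2 + 1) 1).foldl
    (fun count p => if simplePrime p && simplePrime (even_num - p) then count + 1 else count) 0

-- ===== PRECONDITION & SPEC =====
def Spec_goldbach_combinations (even_num : Int) (out : Int) : Prop := out = goldbach_combinations_alt even_num
instance (even_num : Int) (out : Int) : Decidable (Spec_goldbach_combinations even_num out) := by unfold Spec_goldbach_combinations; infer_instance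

-- ===== CLAIM (what is proved, stated in full; the proofs are below) =====
def Claim_equal_goldbach_combinations : Prop := ∀ (even_num : Int), Dom_goldbach_combinations even_num → Spec_goldbach_combinations even_num (goldbach_combinations even_num)

-- ===== LEMMAS AND PROOFS =====

-- "no divisor whose square is ≤ num": the common characterization of both primality tests
def SqrtFree (num : Int) : Prop := ∀ d : Int, 2 ≤ d → d * d ≤ num → ¬ (d ∣ num)

theorem simpleLoop_true_iff (num : Int) : ∀ c : Int, 1 ≤ c →
    (simpleLoop num c = true ↔ ∀ d : Int, c ≤ d → d * d ≤ num → ¬ (d ∣ num)) := by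
  intro c
  induction c using simpleLoop.induct (num := num) with
  | case1 x hle hmod =>
    intro _
    rw [simpleLoop, dif_pos hle, if_pos hmod]
    constructor
    · intro h; cases h
    · intro H
      have hdvd : x ∣ num := (PySem.Int.mod_eq_zero_iff_dvd num x).mp (by simpa using hmod)
      exact absurd hdvd (H x le_rfl hle)
  | case2 x hle hmod ih =>
    intro hc
    rw [simpleLoop, dif_pos hle, if_neg hmod]
    rw [ih (by omega)]
    have hxd : ¬ x ∣ num := fun hd =>
      hmod (by simp [(PySem.Int.mod_eq_zero_iff_dvd num x).mpr hd])
    constructor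
    · intro H d hd hsq
      rcases eq_or_lt_of_le hd with rfl | hlt
      · exact hxd
      · exact H d (by omega) hsq
    · intro H d hd hsq
      exact H d (by omega) hsq
  | case3 x hgt =>
    intro hc
    rw [simpleLoop, dif_neg hgt]
    constructor
    · intro _ d hd hsq _
      have hxx : x * x ≤ d * d := by nlinarith
      exact hgt (by linarith)
    · intro _; rfl

theorem simplePrime_iff (num : Int) :
    simplePrime num = true ↔ (2 ≤ num ∧ SqrtFree num) := by
  unfold simplePrime
  split_ifs with h1
  · constructor
    · intro h; cases h
    · rintro ⟨h2, _⟩; omega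
  · rw [simpleLoop_true_iff num 2 (by omega)]
    unfold SqrtFree
    constructor
    · intro H; exact ⟨by omega, H⟩
    · rintro ⟨_, H⟩; exact H

theorem isPrimeLoop_forward (num : Int) : ∀ i : Int, 5 ≤ i → i % 6 = 5 →
    isPrimeLoop num i = true →
    ∀ d : Int, i ≤ d → d * d ≤ num → (d % 6 = 5 ∨ d % 6 = 1) → ¬ (d ∣ num) := by
  intro i
  induction i using isPrimeLoop.induct (num := num) with
  | case1 x hle hmod =>
    intro _ _ hloop
    rw [isPrimeLoop, dif_pos hle, if_pos hmod] at hloop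
    cases hloop
  | case2 x hle hmod ih =>
    intro h5 hm hloop d hd hsq hdm hdvd
    rw [isPrimeLoop, dif_pos hle, if_neg hmod] at hloop
    have hmods : ¬ x ∣ num ∧ ¬ (x + 2) ∣ num := by
      constructor
      · intro h
        exact hmod (by simp [(PySem.Int.mod_eq_zero_iff_dvd num x).mpr h])
      · intro h
        exact hmod (by simp [(PySem.Int.mod_eq_zero_iff_dvd num (x + 2)).mpr h])
    by_cases hdx : d = x
    · exact hmods.1 (hdx ▸ hdvd)
    · by_cases hdx2 : d = x + 2
      · exact hmods.2 (hdx2 ▸ hdvd)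
      · have hd6 : x + 6 ≤ d := by omega
        exact ih (by omega) (by omega) hloop d hd6 hsq hdm hdvd
  | case3 x hgt =>
    intro h5 _ _ d hd hsq _ _
    have hxx : x * x ≤ d * d := by nlinarith
    exact hgt (by linarith)

theorem isPrimeLoop_backward (num : Int) : ∀ i : Int, 5 ≤ i → SqrtFree num →
    isPrimeLoop num i = true := by
  intro i
  induction i using isPrimeLoop.induct (num := num) with
  | case1 x hle hmod =>
    intro h5 hsf
    exfalso
    have h25 : 25 ≤ num := by nlinarith
    rcases Bool.or_eq_true_iff.mp hmod with h | h
    · exact hsf x (by omega) hle ((PySem.Int.mod_eq_zero_iff_dvd num x).mp (by simpa using h))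
    · have hdvd : (x + 2) ∣ num := (PySem.Int.mod_eq_zero_iff_dvd num (x + 2)).mp (by simpa using h)
      by_cases hsq : (x + 2) * (x + 2) ≤ num
      · exact hsf (x + 2) (by omega) hsq hdvd
      · obtain ⟨c, hc⟩ := hdvd
        have hc2 : 2 ≤ c := by nlinarith
        have hclt : c < x + 2 := by nlinarith
        have hcsq : c * c ≤ num := by nlinarith
        exact hsf c hc2 hcsq ⟨x + 2, by linarith [hc]⟩
  | case2 x hle hmod ih =>
    intro h5 hsf
    rw [isPrimeLoop, dif_pos hle, if_neg hmod]
    exact ih (by omega) hsf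
  | case3 x hgt =>
    intro _ _
    rw [isPrimeLoop, dif_neg hgt]

theorem isPrime_iff (num : Int) :
    isPrime num = true ↔ (2 ≤ num ∧ SqrtFree num) := by
  unfold isPrime
  split_ifs with h1 h2 h3
  · constructor
    · intro h; cases h
    · rintro ⟨h, _⟩; omega
  · constructor
    · intro _
      refine ⟨by omega, fun d hd hsq _ => ?_⟩
      nlinarith
    · intro _; rfl
  · constructor
    · intro h; cases h
    · rintro ⟨h2n, hsf⟩
      rcases Bool.or_eq_true_iff.mp h3 with h | h
      · have hdvd : (2:Int) ∣ num := (PySem.Int.mod_eq_zero_iff_dvd num 2).mp (by simpa using h)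
        exact hsf 2 le_rfl (by omega) hdvd
      · have hdvd : (3:Int) ∣ num := (PySem.Int.mod_eq_zero_iff_dvd num 3).mp (by simpa using h)
        by_cases h9 : 9 ≤ num
        · exact hsf 3 (by omega) (by nlinarith) hdvd
        · have h6 : num = 6 := by omega
          exact hsf 2 le_rfl (by omega) (by omega)
  · have hmods : ¬ (2:Int) ∣ num ∧ ¬ (3:Int) ∣ num := by
      rw [Bool.or_eq_true_iff] at h3
      push Not at h3
      constructor
      · intro h
        exact h3.1 (beq_iff_eq.mpr ((PySem.Int.mod_eq_zero_iff_dvd num 2).mpr h))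
      · intro h
        exact h3.2 (beq_iff_eq.mpr ((PySem.Int.mod_eq_zero_iff_dvd num 3).mpr h))
    constructor
    · intro hloop
      refine ⟨by omega, fun d hd hsq hdvd => ?_⟩
      have h2d : ¬ (2:Int) ∣ d := fun h => hmods.1 (h.trans hdvd)
      have h3d : ¬ (3:Int) ∣ d := fun h => hmods.2 (h.trans hdvd)
      have hdm : d % 6 = 5 ∨ d % 6 = 1 := by omega
      exact isPrimeLoop_forward num 5 (by norm_num) (by norm_num) hloop d (by omega) hsq hdm hdvd
    · rintro ⟨_, hsf⟩
      exact isPrimeLoop_backward num 5 (by norm_num) hsf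

theorem prime_eq (n : Int) : simplePrime n = isPrime n := by
  rw [Bool.eq_iff_iff, simplePrime_iff, isPrime_iff]

theorem isPrime_ge_two {q : Int} (h : isPrime q = true) : 2 ≤ q := by
  unfold isPrime at h
  split_ifs at h with h1
  all_goals omega

theorem goldbach_combinations_eq (n : Int) :
    goldbach_combinations n = goldbach_combinations_alt n := by
  unfold goldbach_combinations goldbach_combinations_alt
  simp only [prime_eq]
  rw [PySem.List.foldl_ite_add_one, PySem.List.foldl_if_add_one]
  have hm : PySem.Int.floordiv n 2 = n / 2 := PySem.Int.floordiv_eq_ediv_of_pos (by norm_num)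
  rw [hm, List.countP_filter]
  congr 1
  rw [List.countP_congr (q := fun x => isPrime x && isPrime (n - x) && decide (x ≤ n / 2)) ?_]
  · by_cases hn : n < 2
    · rw [PySem.List.pyRange_one_eq_nil (a := 2) (b := n) (by omega),
        PySem.List.pyRange_one_eq_nil (a := 2) (b := n / 2 + 1) (by omega)]
      simp
    · replace hn : 2 ≤ n := by omega
      rw [PySem.List.pyRange_one_append 2 (n / 2 + 1) n (by omega) (by omega),
        List.countP_append]
      have h2 : List.countP (fun x => isPrime x && isPrime (n - x) && decide (x ≤ n / 2))
          (PySem.List.pyRange (n / 2 + 1) n) = 0 := by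
        rw [List.countP_eq_zero]
        intro x hx
        have := PySem.List.mem_pyRange_one.mp hx
        simp only [Bool.and_eq_true, decide_eq_true_eq, not_and]
        intro _ _
        omega
      rw [h2, Nat.add_zero]
      congr 1
      apply List.countP_congr
      intro x hx
      have := PySem.List.mem_pyRange_one.mp hx
      simp only [Bool.and_eq_true, decide_eq_true_eq]
      constructor
      · rintro ⟨h1, _⟩; exact h1
      · intro h1; exact ⟨h1, by omega⟩
  · intro x hx
    have hxr := PySem.List.mem_pyRange_one.mp hx
    simp only [Bool.and_eq_true, decide_eq_true_eq, List.contains_eq_mem, List.mem_filter,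
      PySem.List.mem_pyRange_one]
    constructor
    · rintro ⟨⟨⟨_, hp2⟩, hge⟩, hp1⟩; exact ⟨⟨hp1, hp2⟩, by omega⟩
    · rintro ⟨⟨hp1, hp2⟩, hle⟩
      have h2x := isPrime_ge_two hp2
      exact ⟨⟨⟨⟨by omega, by omega⟩, hp2⟩, by omega⟩, hp1⟩

-- ===== VERDICT (by name: the statement is the Claim_ definition above) =====
theorem goldbach_combinations_spec : Claim_equal_goldbach_combinations := by
  intro n _
  exact goldbach_combinations_eq n
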